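-- pv_equiv track=rewrite | github.com/brittytino/wad-lab | backend/bin/AppData/Perflogs/ProgramData/System Volume Information/ds1/05-Stack and Queue/check_wcwr.py | is_wcwr
-- ===== SOURCE A (Python) =====
-- def is_wcwr(s):
--     # length must be even
--     if len(s) % 2 != 0:
--         return False
--     mid = len(s) // 2
--     w = s[:mid]
--     wr = s[mid:]
--     # w must be only a,b
--     for ch in w:
--         if ch not in ('a', 'b'):
--             return False
--     return wr == w[::-1]
-- ===== SOURCE B (Python) =====
-- def is_wcwr(s):
--     n = len(s)
--     if n % 2 != 0:
--         return False
--     i, j = 0, n - 1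
--     while i < j:
--         if s[i] not in ('a', 'b') or s[i] != s[j]:
--             return False
--         i += 1
--         j -= 1
--     return True
-- ===== Notes on version B (the rewrite author's own statement) =====
-- stated objective: alternative
-- what changed: Replaces slicing into w/wr plus a membership scan over w and a reversed-slice comparison with a single inward two-pointer loop that checks the a/b membership of s[i] and the mirror equation s[i]==s[n-1-i] in one pass, with no intermediate strings.
import Mathlib
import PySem

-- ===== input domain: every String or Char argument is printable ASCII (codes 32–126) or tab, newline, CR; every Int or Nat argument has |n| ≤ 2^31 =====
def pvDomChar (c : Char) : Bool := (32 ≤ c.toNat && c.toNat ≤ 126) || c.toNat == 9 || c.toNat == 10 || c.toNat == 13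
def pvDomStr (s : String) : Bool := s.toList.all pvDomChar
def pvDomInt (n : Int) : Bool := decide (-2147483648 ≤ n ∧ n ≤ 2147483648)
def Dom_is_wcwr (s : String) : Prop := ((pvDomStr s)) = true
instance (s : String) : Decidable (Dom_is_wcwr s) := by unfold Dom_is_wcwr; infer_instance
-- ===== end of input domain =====

-- B replaces A's slicing (w, wr, w[::-1]) and separate membership scan with one inward
-- two-pointer loop checking membership and the mirror equality together ("alternative").

-- ===== PORT A =====
-- slices s[:mid] / s[mid:] with 0 ≤ mid ≤ len are exactly take/drop; the for-loop with
-- early return over w is List.all; wr == w[::-1] is List beq of wr with w.reverse.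
def is_wcwr (s : String) : Bool :=
  let l := s.toList
  if l.length % 2 ≠ 0 then false
  else
    let mid := l.length / 2
    let w := l.take mid
    let wr := l.drop mid
    if w.all (fun ch => ch == 'a' || ch == 'b') then wr == w.reverse else false

-- ===== PORT B =====
-- s[i], s[j] are only read with 0 ≤ i < j < len, so getD with a dummy default is exact.
def pvLoop (l : List Char) (i j : Nat) : Bool :=
  if i < j then
    let a := l.getD i ' '
    if (a == 'a' || a == 'b') && a == l.getD j ' ' then pvLoop l (i + 1) (j - 1)
    else false
  else true
termination_by j - i

def is_wcwr_alt (s : String) : Bool :=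
  let l := s.toList
  let n := l.length
  if n % 2 ≠ 0 then false
  else pvLoop l 0 (n - 1)

-- ===== PRECONDITION & SPEC =====
def Spec_is_wcwr (s : String) (out : Bool) : Prop := out = is_wcwr_alt s
instance (s : String) (out : Bool) : Decidable (Spec_is_wcwr s out) := by unfold Spec_is_wcwr; infer_instance

-- ===== CLAIM (what is proved, stated in full; the proofs are below) =====
def Claim_equal_is_wcwr : Prop := ∀ (s : String), Dom_is_wcwr s → Spec_is_wcwr s (is_wcwr s)

-- ===== LEMMAS AND PROOFS =====

-- the predicate both programs enforce on the first-half character at index k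
def pvOK (l : List Char) (k : Nat) : Prop :=
  (l.getD k ' ' = 'a' ∨ l.getD k ' ' = 'b') ∧ l.getD k ' ' = l.getD (l.length - 1 - k) ' '

-- B's loop, characterised by indices, under the invariant i + j + 1 = l.length
lemma pvLoop_iff (l : List Char) (j : Nat) : ∀ i, i + j + 1 = l.length →
    (pvLoop l i j = true ↔ ∀ k, i ≤ k → 2 * k + 1 < l.length → pvOK l k) := by
  induction j with
  | zero =>
    intro i h
    rw [pvLoop]
    simp only [Nat.not_lt_zero, if_false, true_iff]  -- i < 0 is false
    intro k hk hk2; omega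
  | succ j ih =>
    intro i h
    rw [pvLoop]
    by_cases hij : i < j + 1
    · simp only [hij, if_true]
      have hrec := ih (i + 1) (by omega)
      constructor
      · intro hres k hk hk2
        split_ifs at hres with hc
        · rcases Nat.eq_or_lt_of_le hk with heq | hk'
          · subst heq
            simp only [Bool.and_eq_true, Bool.or_eq_true, beq_iff_eq] at hc
            refine ⟨hc.1, ?_⟩
            have he : l.length - 1 - i = j + 1 := by omega
            rw [he]; exact hc.2
          · exact (hrec.mp hres) k (by omega) hk2
      · intro hall
        have hci : pvOK l i := hall i le_rfl (by omega)
        have hc : ((l.getD i ' ' == 'a' || l.getD i ' ' == 'b') &&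
            l.getD i ' ' == l.getD (j + 1) ' ') = true := by
          simp only [Bool.and_eq_true, Bool.or_eq_true, beq_iff_eq]
          have : l.length - 1 - i = j + 1 := by omega
          exact ⟨hci.1, this ▸ hci.2⟩
        rw [if_pos hc]
        exact hrec.mpr (fun k hk hk2 => hall k (by omega) hk2)
    · simp only [hij, if_false, true_iff]
      intro k hk hk2; omega

-- A's membership scan over the first half, characterised by indices
lemma pvAll_iff (l : List Char) (m : Nat) (hm : m ≤ l.length) :
    ((l.take m).all (fun ch => ch == 'a' || ch == 'b') = true) ↔
      ∀ k, k < m → (l.getD k ' ' = 'a' ∨ l.getD k ' ' = 'b') := by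
  rw [List.all_eq_true]
  constructor
  · intro h k hk
    have hkl : k < l.length := lt_of_lt_of_le hk hm
    have hmem : l.getD k ' ' ∈ l.take m := by
      rw [List.getD_eq_getElem l ' ' hkl]
      have hkt : k < (l.take m).length := by simp; omega
      have : l[k] = (l.take m)[k] := (List.getElem_take).symm
      rw [this]
      exact List.getElem_mem hkt
    have := h _ hmem
    simpa using this
  · intro h x hx
    obtain ⟨k, hk, rfl⟩ := List.mem_iff_getElem.mp hx
    have hkm : k < m := by
      have := hk; simp at this; omega
    have hkl : k < l.length := lt_of_lt_of_le hkm hm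
    have : (l.take m)[k] = l.getD k ' ' := by
      rw [List.getD_eq_getElem l ' ' hkl]; exact List.getElem_take
    rw [this]
    simpa using h k hkm

-- A's reversed-slice comparison, characterised by indices (for even length 2*m)
lemma pvRev_iff (l : List Char) (m : Nat) (hl : l.length = 2 * m) :
    (l.drop m = (l.take m).reverse) ↔
      ∀ k, k < m → l.getD (m + k) ' ' = l.getD (m - 1 - k) ' ' := by
  constructor
  · intro h k hk
    have h1 : m + k < l.length := by omega
    have h2 : m - 1 - k < l.length := by omega
    rw [List.getD_eq_getElem l ' ' h1, List.getD_eq_getElem l ' ' h2]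
    have hk' : k < (l.drop m).length := by simp; omega
    have e1 : l[m + k] = (l.drop m)[k]'hk' := (List.getElem_drop ..).symm
    have hk'' : k < ((l.take m).reverse).length := by simp; omega
    have e2 : ((l.take m).reverse)[k]'hk'' = (l.take m)[m - 1 - k]'(by simp; omega) := by
      rw [List.getElem_reverse]; congr 1; simp; omega
    have e3 : (l.take m)[m - 1 - k]'(by simp; omega) = l[m - 1 - k] := List.getElem_take
    rw [e1]
    calc (l.drop m)[k]'hk' = ((l.take m).reverse)[k]'hk'' := List.getElem_of_eq h hk'
      _ = l[m - 1 - k] := by rw [e2, e3]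
  · intro h
    apply List.ext_getElem
    · simp; omega
    · intro k hk1 hk2
      have hkm : k < m := by simp at hk1; omega
      have e1 : (l.drop m)[k] = l[m + k]'(by omega) := List.getElem_drop ..
      have e2 : ((l.take m).reverse)[k] = l[m - 1 - k]'(by omega) := by
        rw [List.getElem_reverse, List.getElem_take]
        congr 1; simp; omega
      rw [e1, e2, ← List.getD_eq_getElem l ' ', ← List.getD_eq_getElem l ' ']
      exact h k hkm

-- the two index characterisations describe the same set of constraints
lemma pv_bridge (l : List Char) (m : Nat) (hl : l.length = 2 * m) :
    (∀ k, 0 ≤ k → 2 * k + 1 < l.length → pvOK l k) ↔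
      ((∀ k, k < m → (l.getD k ' ' = 'a' ∨ l.getD k ' ' = 'b')) ∧
       (∀ k, k < m → l.getD (m + k) ' ' = l.getD (m - 1 - k) ' ')) := by
  constructor
  · intro h
    refine ⟨fun k hk => (h k (by omega) (by omega)).1, fun k hk => ?_⟩
    have := (h (m - 1 - k) (by omega) (by omega)).2
    have e1 : l.length - 1 - (m - 1 - k) = m + k := by omega
    rw [e1] at this
    exact this.symm
  · intro ⟨h1, h2⟩ k _ hk2
    have hkm : k < m := by omega
    refine ⟨h1 k hkm, ?_⟩
    have := h2 (m - 1 - k) (by omega)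
    have e1 : m + (m - 1 - k) = l.length - 1 - k := by omega
    have e2 : m - 1 - (m - 1 - k) = k := by omega
    rw [e1, e2] at this
    exact this.symm

-- ===== VERDICT (by name: the statement is the Claim_ definition above) =====
theorem is_wcwr_spec : Claim_equal_is_wcwr := by
  intro s _
  show is_wcwr s = is_wcwr_alt s
  unfold is_wcwr is_wcwr_alt
  generalize s.toList = l
  by_cases hodd : l.length % 2 ≠ 0
  · simp [hodd]
  · simp only [hodd, if_false]
    rcases Nat.eq_zero_or_pos l.length with h0 | hpos
    · have hnil : l = [] := List.eq_nil_of_length_eq_zero h0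
      subst hnil; rw [pvLoop]; simp
    · set m := l.length / 2 with hm
      have hlen : l.length = 2 * m := by omega
      rw [Bool.eq_iff_iff]
      rw [pvLoop_iff l (l.length - 1) 0 (by omega)]
      rw [pv_bridge l m hlen]
      constructor
      · intro h
        split_ifs at h with hall
        · exact ⟨(pvAll_iff l m (by omega)).mp hall,
            (pvRev_iff l m hlen).mp (by simpa [beq_iff_eq] using h)⟩
      · intro ⟨h1, h2⟩
        rw [if_pos ((pvAll_iff l m (by omega)).mpr h1)]
        simpa [beq_iff_eq] using (pvRev_iff l m hlen).mpr h2
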